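-- pv_equiv track=rewrite | github.com/Pixel-Mensch/nullsec-trader | market_plausibility.py | _primary_reason_from_flags
-- ===== SOURCE A (Python) =====
-- def _primary_reason_from_flags(flags: set[str]) -> str:
--     reason_priority = [
--         "FAKE_SPREAD_RISK",
--         "UNUSABLE_DEPTH",
--         "THIN_TOP_OF_BOOK",
--         "DEPTH_COLLAPSE",
--         "EXTREME_REFERENCE_DEVIATION",
--         "ORDERBOOK_CONCENTRATION",
--     ]
--     return next((code for code in reason_priority if code in flags), "")
-- ===== SOURCE B (Python) =====
-- def _primary_reason_from_flags(flags: set[str]) -> str: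
--     order = [
--         "FAKE_SPREAD_RISK",
--         "UNUSABLE_DEPTH",
--         "THIN_TOP_OF_BOOK",
--         "DEPTH_COLLAPSE",
--         "EXTREME_REFERENCE_DEVIATION",
--         "ORDERBOOK_CONCENTRATION",
--     ]
--     rank = {code: i for i, code in enumerate(order)}
--     best = len(order)
--     for code in flags:
--         best = min(best, rank.get(code, len(order)))
--     return order[best] if best < len(order) else ""
-- ===== Notes on version B (the rewrite author's own statement) =====
-- stated objective: alternative
-- what changed: Instead of scanning the fixed priority list and testing membership of each code in the flag set, B builds a code->rank table once and makes a single pass over the input flags keeping the minimal rank, then maps the rank back to its code.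
import Mathlib
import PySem

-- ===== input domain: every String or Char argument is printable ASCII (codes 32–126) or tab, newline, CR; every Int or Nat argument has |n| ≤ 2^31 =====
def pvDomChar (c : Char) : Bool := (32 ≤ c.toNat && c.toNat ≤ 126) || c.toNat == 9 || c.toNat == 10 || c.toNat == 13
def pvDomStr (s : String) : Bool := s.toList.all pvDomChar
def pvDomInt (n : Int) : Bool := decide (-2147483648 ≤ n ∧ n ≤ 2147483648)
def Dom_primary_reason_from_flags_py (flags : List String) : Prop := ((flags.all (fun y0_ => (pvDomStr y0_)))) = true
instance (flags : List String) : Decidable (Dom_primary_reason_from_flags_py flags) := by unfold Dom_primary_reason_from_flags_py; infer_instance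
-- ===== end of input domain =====

-- B replaces A's scan of the priority list (with a membership test per code) by a single pass
-- over the input set keeping the minimal rank from a precomputed rank table; objective: alternative.
-- The Python set[str] argument is modelled as List String of its distinct elements (PySem.Set).

-- ===== PORT A =====
-- next((code for code in reason_priority if code in flags), "")  =  find? … |>.getD ""
def primary_reason_from_flags_py (flags : List String) : String :=
  let reason_priority : List String :=
    ["FAKE_SPREAD_RISK", "UNUSABLE_DEPTH", "THIN_TOP_OF_BOOK", "DEPTH_COLLAPSE",
     "EXTREME_REFERENCE_DEVIATION", "ORDERBOOK_CONCENTRATION"]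
  (reason_priority.find? (fun code => flags.contains code)).getD ""

-- ===== PORT B =====
def pvOrderB : List String :=
  ["FAKE_SPREAD_RISK", "UNUSABLE_DEPTH", "THIN_TOP_OF_BOOK", "DEPTH_COLLAPSE",
   "EXTREME_REFERENCE_DEVIATION", "ORDERBOOK_CONCENTRATION"]

-- rank = {code: i for i, code in enumerate(order)}
def pvRankB : PySem.Dict String Int :=
  (PySem.List.enumerate pvOrderB).foldl (fun d p => d.insert p.2 p.1) PySem.Dict.empty

-- the loop 'best = min(best, rank.get(code, len(order)))' over flags; len(order) = 6
def primary_reason_from_flags_py_alt (flags : List String) : String :=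
  let best : Int := flags.foldl (fun m code => min m (pvRankB.getD code 6)) 6
  if best < 6 then (PySem.List.pyGet? pvOrderB best).getD "" else ""

-- ===== PRECONDITION & SPEC =====
def Spec_primary_reason_from_flags_py (flags : List String) (out : String) : Prop := out = primary_reason_from_flags_py_alt flags
instance (flags : List String) (out : String) : Decidable (Spec_primary_reason_from_flags_py flags out) := by unfold Spec_primary_reason_from_flags_py; infer_instance

-- ===== CLAIM (what is proved, stated in full; the proofs are below) =====
def Claim_equal_primary_reason_from_flags_py : Prop := ∀ (flags : List String), Dom_primary_reason_from_flags_py flags → Spec_primary_reason_from_flags_py flags (primary_reason_from_flags_py flags)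

-- ===== LEMMAS AND PROOFS =====

-- the rank function B looks up
def pvR (c : String) : Int := pvRankB.getD c 6

lemma pvRankB_eq : pvRankB = PySem.Dict.mk
    [("FAKE_SPREAD_RISK", (0 : Int)), ("UNUSABLE_DEPTH", 1), ("THIN_TOP_OF_BOOK", 2),
     ("DEPTH_COLLAPSE", 3), ("EXTREME_REFERENCE_DEVIATION", 4), ("ORDERBOOK_CONCENTRATION", 5)] := by
  decide

lemma pvR_cases (c : String) :
    pvR c = 6 ∨ (pvR c = 0 ∧ c = "FAKE_SPREAD_RISK") ∨ (pvR c = 1 ∧ c = "UNUSABLE_DEPTH")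
      ∨ (pvR c = 2 ∧ c = "THIN_TOP_OF_BOOK") ∨ (pvR c = 3 ∧ c = "DEPTH_COLLAPSE")
      ∨ (pvR c = 4 ∧ c = "EXTREME_REFERENCE_DEVIATION") ∨ (pvR c = 5 ∧ c = "ORDERBOOK_CONCENTRATION") := by
  simp only [pvR, pvRankB_eq, PySem.Dict.getD_eq_get?_getD, PySem.Dict.get?_mk_cons]
  split_ifs with h1 h2 h3 h4 h5 h6 <;> simp_all [PySem.Dict.get?, List.find?]

lemma pvBest_mem (flags : List String) :
    flags.foldl (fun m code => min m (pvR code)) 6 = 6 ∨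
      ∃ c ∈ flags, flags.foldl (fun m code => min m (pvR code)) 6 = pvR c := by
  have h : flags.foldl (fun m code => min m (pvR code)) 6
      = (flags.map pvR).foldl min 6 := (List.foldl_map ..).symm
  rw [h]
  rcases PySem.List.foldl_min_mem (flags.map pvR) 6 with h1 | h1
  · exact Or.inl h1
  · rcases List.mem_map.mp h1 with ⟨c, hc, hrc⟩
    exact Or.inr ⟨c, hc, hrc.symm⟩

lemma pvBest_le (flags : List String) :
    ∀ c ∈ flags, flags.foldl (fun m code => min m (pvR code)) 6 ≤ pvR c := by
  have h : flags.foldl (fun m code => min m (pvR code)) 6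
      = (flags.map pvR).foldl min 6 := (List.foldl_map ..).symm
  rw [h]
  exact fun c hc => (PySem.List.foldl_min_le (flags.map pvR) 6).2 _ (List.mem_map_of_mem hc)

lemma pvR_lit : pvR "FAKE_SPREAD_RISK" = 0 ∧ pvR "UNUSABLE_DEPTH" = 1 ∧ pvR "THIN_TOP_OF_BOOK" = 2
    ∧ pvR "DEPTH_COLLAPSE" = 3 ∧ pvR "EXTREME_REFERENCE_DEVIATION" = 4
    ∧ pvR "ORDERBOOK_CONCENTRATION" = 5 := by decide

-- ===== VERDICT (by name: the statement is the Claim_ definition above) =====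
theorem primary_reason_from_flags_py_spec : Claim_equal_primary_reason_from_flags_py := by
  intro flags _
  have hA : primary_reason_from_flags_py flags =
      (List.find? (fun code => flags.contains code)
        ["FAKE_SPREAD_RISK", "UNUSABLE_DEPTH", "THIN_TOP_OF_BOOK", "DEPTH_COLLAPSE",
         "EXTREME_REFERENCE_DEVIATION", "ORDERBOOK_CONCENTRATION"]).getD "" := rfl
  have hB : primary_reason_from_flags_py_alt flags =
      (if flags.foldl (fun m code => min m (pvR code)) 6 < 6 then
        (PySem.List.pyGet? pvOrderB (flags.foldl (fun m code => min m (pvR code)) 6)).getD ""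
       else "") := rfl
  show primary_reason_from_flags_py flags = primary_reason_from_flags_py_alt flags
  rw [hA, hB]
  have hle := pvBest_le flags
  have hmem := pvBest_mem flags
  obtain ⟨r0, r1, r2, r3, r4, r5⟩ := pvR_lit
  set b := flags.foldl (fun m code => min m (pvR code)) 6 with hb
  have hnc : ∀ s : String, pvR s < b → ¬ s ∈ flags :=
    fun s hs hmem => absurd (hle s hmem) (not_le.mpr hs)
  rcases hmem with h6 | ⟨c, hc, hbc⟩
  · rw [h6]
    have hrhs : (if ((6 : Int)) < 6 then (PySem.List.pyGet? pvOrderB ((6 : Int))).getD "" else "") = "" := by decide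
    rw [hrhs]
    have c0 := hnc _ (by rw [r0, h6]; norm_num)
    have c1 := hnc _ (by rw [r1, h6]; norm_num)
    have c2 := hnc _ (by rw [r2, h6]; norm_num)
    have c3 := hnc _ (by rw [r3, h6]; norm_num)
    have c4 := hnc _ (by rw [r4, h6]; norm_num)
    have c5 := hnc _ (by rw [r5, h6]; norm_num)
    simp [List.find?, c0, c1, c2, c3, c4, c5]
  · rcases pvR_cases c with h | ⟨h, rfl⟩ | ⟨h, rfl⟩ | ⟨h, rfl⟩ | ⟨h, rfl⟩ | ⟨h, rfl⟩ | ⟨h, rfl⟩ <;>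
    rw [h] at hbc
    · rw [hbc]
      have hrhs : (if ((6 : Int)) < 6 then (PySem.List.pyGet? pvOrderB ((6 : Int))).getD "" else "") = "" := by decide
      rw [hrhs]
      have c0 := hnc _ (by rw [r0, hbc]; norm_num)
      have c1 := hnc _ (by rw [r1, hbc]; norm_num)
      have c2 := hnc _ (by rw [r2, hbc]; norm_num)
      have c3 := hnc _ (by rw [r3, hbc]; norm_num)
      have c4 := hnc _ (by rw [r4, hbc]; norm_num)
      have c5 := hnc _ (by rw [r5, hbc]; norm_num)
      simp [List.find?, c0, c1, c2, c3, c4, c5]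
    · rw [hbc]
      have hrhs : (if ((0 : Int)) < 6 then (PySem.List.pyGet? pvOrderB ((0 : Int))).getD "" else "") = "FAKE_SPREAD_RISK" := by decide
      rw [hrhs]
      simp [List.find?, hc]
    · rw [hbc]
      have hrhs : (if ((1 : Int)) < 6 then (PySem.List.pyGet? pvOrderB ((1 : Int))).getD "" else "") = "UNUSABLE_DEPTH" := by decide
      rw [hrhs]
      have c0 := hnc _ (by rw [r0, hbc]; norm_num)
      simp [List.find?, hc, c0]
    · rw [hbc]
      have hrhs : (if ((2 : Int)) < 6 then (PySem.List.pyGet? pvOrderB ((2 : Int))).getD "" else "") = "THIN_TOP_OF_BOOK" := by decide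
      rw [hrhs]
      have c0 := hnc _ (by rw [r0, hbc]; norm_num)
      have c1 := hnc _ (by rw [r1, hbc]; norm_num)
      simp [List.find?, hc, c0, c1]
    · rw [hbc]
      have hrhs : (if ((3 : Int)) < 6 then (PySem.List.pyGet? pvOrderB ((3 : Int))).getD "" else "") = "DEPTH_COLLAPSE" := by decide
      rw [hrhs]
      have c0 := hnc _ (by rw [r0, hbc]; norm_num)
      have c1 := hnc _ (by rw [r1, hbc]; norm_num)
      have c2 := hnc _ (by rw [r2, hbc]; norm_num)
      simp [List.find?, hc, c0, c1, c2]
    · rw [hbc]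
      have hrhs : (if ((4 : Int)) < 6 then (PySem.List.pyGet? pvOrderB ((4 : Int))).getD "" else "") = "EXTREME_REFERENCE_DEVIATION" := by decide
      rw [hrhs]
      have c0 := hnc _ (by rw [r0, hbc]; norm_num)
      have c1 := hnc _ (by rw [r1, hbc]; norm_num)
      have c2 := hnc _ (by rw [r2, hbc]; norm_num)
      have c3 := hnc _ (by rw [r3, hbc]; norm_num)
      simp [List.find?, hc, c0, c1, c2, c3]
    · rw [hbc]
      have hrhs : (if ((5 : Int)) < 6 then (PySem.List.pyGet? pvOrderB ((5 : Int))).getD "" else "") = "ORDERBOOK_CONCENTRATION" := by decide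
      rw [hrhs]
      have c0 := hnc _ (by rw [r0, hbc]; norm_num)
      have c1 := hnc _ (by rw [r1, hbc]; norm_num)
      have c2 := hnc _ (by rw [r2, hbc]; norm_num)
      have c3 := hnc _ (by rw [r3, hbc]; norm_num)
      have c4 := hnc _ (by rw [r4, hbc]; norm_num)
      simp [List.find?, hc, c0, c1, c2, c3, c4]
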